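-- pv_equiv track=rewrite | github.com/ferpjm/Algorithm-analysis-design | Voraces/VorazGreedy.py | voraz
-- ===== SOURCE A (Python) =====
-- def voraz(tiempos):
--     tiempoEsperaAcumulado=0
--     acu=0
--     while(len(tiempos)!=0):
--         menorTiempo=tiempos[0]
--         for i in range(len(tiempos)):
--             if (tiempos[i]<menorTiempo):
--                 menorTiempo=tiempos[i]
--
--         tiempos.remove(menorTiempo)
--         acu=acu+menorTiempo
--         tiempoEsperaAcumulado=tiempoEsperaAcumulado+acu
--     return tiempoEsperaAcumulado
-- ===== SOURCE B (Python) =====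
-- def voraz(tiempos):
--     # Sort once, then accumulate prefix sums in one pass (O(n log n) instead of
--     # A's repeated min-scan + remove O(n^2)). Note: A empties its argument list
--     # in place; B leaves it untouched (return value is identical).
--     total = 0
--     acu = 0
--     for t in sorted(tiempos):
--         acu += t
--         total += acu
--     return total
-- ===== Notes on version B (the rewrite author's own statement) =====
-- stated objective: faster
-- what changed: Replaced the repeated min-scan-and-remove loop by a single sort followed by one prefix-sum accumulation pass (A also empties its argument in place; B does not mutate it).
import Mathlib
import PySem

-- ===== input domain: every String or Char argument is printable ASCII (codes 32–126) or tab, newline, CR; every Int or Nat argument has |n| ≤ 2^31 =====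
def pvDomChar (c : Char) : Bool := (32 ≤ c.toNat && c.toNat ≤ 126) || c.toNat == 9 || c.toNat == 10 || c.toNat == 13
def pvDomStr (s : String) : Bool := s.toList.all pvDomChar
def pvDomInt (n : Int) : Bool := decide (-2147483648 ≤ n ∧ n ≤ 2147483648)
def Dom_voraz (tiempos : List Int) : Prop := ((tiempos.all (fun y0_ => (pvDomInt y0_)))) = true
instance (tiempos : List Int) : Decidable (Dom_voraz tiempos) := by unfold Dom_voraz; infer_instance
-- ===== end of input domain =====

-- B replaces A's quadratic min-scan-and-remove loop by sort + one prefix-sum pass (faster).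
-- A empties its argument list in place; the equivalence proved here is about the return value.

-- ===== PORT A =====
-- inner 'for i in range(len(tiempos)): if tiempos[i] < menor: menor = tiempos[i]'
def vorazScanMin (ts : List Int) (m0 : Int) : Int :=
  ts.foldl (fun m t => if t < m then t else m) m0

-- the while loop, with fuel = initial length (each iteration removes one element)
def vorazLoop : Nat → List Int → Int → Int → Int
  | 0, _, tea, _ => tea
  | _ + 1, [], tea, _ => tea
  | n + 1, t0 :: rest, tea, acu =>
    let m := vorazScanMin (t0 :: rest) t0
    match PySem.List.remove? (t0 :: rest) m with
    | some ts' => vorazLoop n ts' (tea + (acu + m)) (acu + m)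
    | none => tea  -- unreachable: m is an element of the list

def voraz (tiempos : List Int) : Int :=
  vorazLoop tiempos.length tiempos 0 0

-- ===== PORT B =====
def voraz_alt (tiempos : List Int) : Int :=
  ((PySem.List.sorted tiempos (fun x => x) false).foldl
    (fun p t => (p.1 + (p.2 + t), p.2 + t)) ((0 : Int), (0 : Int))).1

-- ===== PRECONDITION & SPEC =====
def Spec_voraz (tiempos : List Int) (out : Int) : Prop := out = voraz_alt tiempos
instance (tiempos : List Int) (out : Int) : Decidable (Spec_voraz tiempos out) := by unfold Spec_voraz; infer_instance

-- ===== CLAIM (what is proved, stated in full; the proofs are below) =====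
def Claim_equal_voraz : Prop := ∀ (tiempos : List Int), Dom_voraz tiempos → Spec_voraz tiempos (voraz tiempos)

-- ===== LEMMAS AND PROOFS =====

theorem vorazScanMin_eq_foldl_min (ts : List Int) (m0 : Int) :
    vorazScanMin ts m0 = ts.foldl min m0 := by
  unfold vorazScanMin
  have h : (fun (m t : Int) => if t < m then t else m) = min := by
    funext m t; simp [min_def]; omega
  rw [h]

theorem vorazScanMin_mem (t0 : Int) (rest : List Int) :
    vorazScanMin (t0 :: rest) t0 ∈ t0 :: rest := by
  rw [vorazScanMin_eq_foldl_min]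
  simp only [List.foldl_cons, min_self]
  rcases PySem.List.foldl_min_mem rest t0 with h | h
  · rw [h]; exact List.mem_cons_self
  · exact List.mem_cons_of_mem _ h

theorem vorazScanMin_le (t0 : Int) (rest : List Int) :
    ∀ y ∈ t0 :: rest, vorazScanMin (t0 :: rest) t0 ≤ y := by
  rw [vorazScanMin_eq_foldl_min]
  simp only [List.foldl_cons, min_self]
  intro y hy
  rcases List.mem_cons.mp hy with h | h
  · subst h; exact (PySem.List.foldl_min_le rest y).1
  · exact (PySem.List.foldl_min_le rest t0).2 y h

-- sorted xs = min :: sorted (xs.erase min)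
theorem sorted_cons_min (xs : List Int) (m : Int) (hm : m ∈ xs)
    (hle : ∀ y ∈ xs, m ≤ y) :
    PySem.List.sorted xs (fun x => x) false
      = m :: PySem.List.sorted (xs.erase m) (fun x => x) false := by
  apply PySem.List.sorted_id_eq_of_perm_of_pairwise
  · exact ((PySem.List.sorted_perm _ _ _).cons m).trans (List.perm_cons_erase hm).symm
  · refine List.Pairwise.cons ?_ ?_
    · intro y hy
      exact hle y (List.mem_of_mem_erase ((PySem.List.mem_sorted _ _ _ _).mp hy))
    · exact PySem.List.sorted_pairwise _ _

theorem vorazLoop_eq (n : Nat) :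
    ∀ (ts : List Int) (tea acu : Int), ts.length ≤ n →
    vorazLoop n ts tea acu
      = ((PySem.List.sorted ts (fun x => x) false).foldl
          (fun p t => (p.1 + (p.2 + t), p.2 + t)) (tea, acu)).1 := by
  induction n with
  | zero =>
    intro ts tea acu h
    have : ts = [] := List.length_eq_zero_iff.mp (Nat.le_zero.mp h)
    subst this
    simp [vorazLoop, PySem.List.sorted]
  | succ n ih =>
    intro ts tea acu h
    match ts with
    | [] => simp [vorazLoop, PySem.List.sorted]
    | t0 :: rest =>
      have hm := vorazScanMin_mem t0 rest
      have hle := vorazScanMin_le t0 rest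
      set m := vorazScanMin (t0 :: rest) t0 with hmdef
      rw [sorted_cons_min _ m hm hle]
      have hrem : PySem.List.remove? (t0 :: rest) m = some ((t0 :: rest).erase m) :=
        PySem.List.remove?_eq_some_erase _ m hm
      have hlen : ((t0 :: rest).erase m).length ≤ n := by
        rw [List.length_erase_of_mem hm]
        simpa using h
      simp only [vorazLoop, ← hmdef, hrem, List.foldl_cons]
      exact ih _ _ _ hlen

-- ===== VERDICT (by name: the statement is the Claim_ definition above) =====
theorem voraz_spec : Claim_equal_voraz := by
  intro tiempos _
  unfold Spec_voraz voraz voraz_alt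
  exact vorazLoop_eq tiempos.length tiempos 0 0 le_rfl
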